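-- pv_equiv track=rewrite | github.com/viviansongg/Bias-Project | bias_factors/citations_evaluate.py | evaluate_bibliography
-- ===== SOURCE A (Python) =====
-- source_quality_scores = {
--     'journal': 10,
--     'book': 8,
--     'website': 5,
--     'blog': 2,
--     # Add more source types and their scores as needed
-- }
--
-- def evaluate_bibliography(bibliography):
--     score = 0
--     for ref in bibliography:
--         # Simplified source type detection
--         if 'journal' in ref.lower():
--             score += source_quality_scores['journal']
--         elif 'book' in ref.lower():
--             score += source_quality_scores['book']
--         elif 'http' in ref.lower():
--             score += source_quality_scores['website']
--         elif 'blog' in ref.lower():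
--             score += source_quality_scores['blog']
--         else:
--             score += 1  # Default minimal score for unrecognized source types
--     return score
-- ===== SOURCE B (Python) =====
-- SOURCE_TABLE = [('journal', 10), ('book', 8), ('http', 5), ('blog', 2)]
--
-- def evaluate_bibliography(bibliography):
--     # Loop over categories, not references: count and remove the references
--     # matched by each category in priority order; leftovers score 1 each.
--     remaining = [ref.lower() for ref in bibliography]
--     total = 0
--     for sub, pts in SOURCE_TABLE:
--         matched = [r for r in remaining if sub in r]
--         total += pts * len(matched)
--         remaining = [r for r in remaining if sub not in r]
--     return total + len(remaining)
-- ===== Notes on version B (the rewrite author's own statement) =====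
-- stated objective: alternative
-- what changed: Inverts the loop: instead of an if/elif cascade scoring each reference in one pass, B iterates over the priority table of categories, counting and filtering out the matching lowercased references per category (score = points x count), and adds 1 per leftover reference.
import Mathlib
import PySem

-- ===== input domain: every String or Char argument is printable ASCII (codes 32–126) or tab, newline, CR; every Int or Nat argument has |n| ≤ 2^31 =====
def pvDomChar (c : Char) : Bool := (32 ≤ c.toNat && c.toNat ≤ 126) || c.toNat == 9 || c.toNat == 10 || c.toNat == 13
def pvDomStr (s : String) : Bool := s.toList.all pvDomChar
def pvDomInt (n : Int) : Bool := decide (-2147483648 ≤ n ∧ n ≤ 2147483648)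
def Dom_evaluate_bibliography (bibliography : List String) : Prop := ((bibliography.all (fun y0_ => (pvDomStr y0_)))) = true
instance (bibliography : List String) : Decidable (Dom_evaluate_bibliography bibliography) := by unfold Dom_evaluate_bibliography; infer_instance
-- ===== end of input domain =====

-- B inverts the loop: it iterates over the priority categories, counting and filtering out
-- the matching lowercased references per category, instead of scoring each reference by a cascade.

-- ===== PORT A =====
-- module-level dict source_quality_scores
def source_quality_scores : PySem.Dict String Int :=
  PySem.Dict.ofList [("journal", 10), ("book", 8), ("website", 5), ("blog", 2)]

def evaluate_bibliography (bibliography : List String) : Int :=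
  bibliography.foldl (fun score ref =>
    if PySem.Str.isIn "journal" (PySem.Str.lower ref) then
      score + PySem.Dict.getD source_quality_scores "journal" 0
    else if PySem.Str.isIn "book" (PySem.Str.lower ref) then
      score + PySem.Dict.getD source_quality_scores "book" 0
    else if PySem.Str.isIn "http" (PySem.Str.lower ref) then
      score + PySem.Dict.getD source_quality_scores "website" 0
    else if PySem.Str.isIn "blog" (PySem.Str.lower ref) then
      score + PySem.Dict.getD source_quality_scores "blog" 0
    else
      score + 1) 0

-- ===== PORT B =====
def SOURCE_TABLE : List (String × Int) := [("journal", 10), ("book", 8), ("http", 5), ("blog", 2)]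

-- the category loop of Source B: per (sub, pts), add pts * (number of matching refs) and drop them
def eval_go (total : Int) (remaining : List String) : List (String × Int) → Int
  | [] => total + (remaining.length : Int)
  | (sub, pts) :: rest =>
      eval_go (total + pts * ((remaining.filter (fun r => PySem.Str.isIn sub r)).length : Int))
              (remaining.filter (fun r => !(PySem.Str.isIn sub r))) rest

def evaluate_bibliography_alt (bibliography : List String) : Int :=
  eval_go 0 (bibliography.map PySem.Str.lower) SOURCE_TABLE

-- ===== PRECONDITION & SPEC =====
def Spec_evaluate_bibliography (bibliography : List String) (out : Int) : Prop := out = evaluate_bibliography_alt bibliography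
instance (bibliography : List String) (out : Int) : Decidable (Spec_evaluate_bibliography bibliography out) := by unfold Spec_evaluate_bibliography; infer_instance

-- ===== CLAIM (what is proved, stated in full; the proofs are below) =====
def Claim_equal_evaluate_bibliography : Prop := ∀ (bibliography : List String), Dom_evaluate_bibliography bibliography → Spec_evaluate_bibliography bibliography (evaluate_bibliography bibliography)

-- ===== LEMMAS AND PROOFS =====

-- first-match score of a lowercased string against a table (proof-only abstraction)
def tblScore : List (String × Int) → String → Int
  | [], _ => 1
  | (sub, pts) :: rest, low => if PySem.Str.isIn sub low then pts else tblScore rest low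

theorem sum_split (sub : String) (pts : Int) (rest : List (String × Int)) (rem : List String) :
    (rem.map (tblScore ((sub, pts) :: rest))).sum =
      pts * ((rem.filter (fun r => PySem.Str.isIn sub r)).length : Int)
      + ((rem.filter (fun r => !(PySem.Str.isIn sub r))).map (tblScore rest)).sum := by
  induction rem with
  | nil => simp
  | cons r rs ih =>
    simp only [List.map_cons, List.sum_cons, List.filter_cons, ih]
    rw [tblScore]
    by_cases h : PySem.Str.isIn sub r = true
    · simp only [h, if_true, Bool.not_true, Bool.false_eq_true, if_false, List.length_cons]
      push_cast; ring
    · have h' : PySem.Str.isIn sub r = false := by simpa using h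
      simp only [h', Bool.false_eq_true, if_false, Bool.not_false, if_true,
        List.map_cons, List.sum_cons]
      ring

theorem go_eq (table : List (String × Int)) (total : Int) (rem : List String) :
    eval_go total rem table = total + (rem.map (tblScore table)).sum := by
  induction table generalizing total rem with
  | nil =>
    simp [eval_go, tblScore]
  | cons hd rest ih =>
    obtain ⟨sub, pts⟩ := hd
    rw [eval_go, ih, sum_split]
    ring

-- per-reference: A's if/elif cascade adds exactly the first-match table score
theorem step_eq (score : Int) (ref : String) :
    (if PySem.Str.isIn "journal" (PySem.Str.lower ref) then
      score + PySem.Dict.getD source_quality_scores "journal" 0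
    else if PySem.Str.isIn "book" (PySem.Str.lower ref) then
      score + PySem.Dict.getD source_quality_scores "book" 0
    else if PySem.Str.isIn "http" (PySem.Str.lower ref) then
      score + PySem.Dict.getD source_quality_scores "website" 0
    else if PySem.Str.isIn "blog" (PySem.Str.lower ref) then
      score + PySem.Dict.getD source_quality_scores "blog" 0
    else
      score + 1) = score + tblScore SOURCE_TABLE (PySem.Str.lower ref) := by
  simp only [SOURCE_TABLE, tblScore]
  split_ifs <;> rfl

theorem foldl_eq (bibliography : List String) (acc : Int) :
    bibliography.foldl (fun score ref =>
      if PySem.Str.isIn "journal" (PySem.Str.lower ref) then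
        score + PySem.Dict.getD source_quality_scores "journal" 0
      else if PySem.Str.isIn "book" (PySem.Str.lower ref) then
        score + PySem.Dict.getD source_quality_scores "book" 0
      else if PySem.Str.isIn "http" (PySem.Str.lower ref) then
        score + PySem.Dict.getD source_quality_scores "website" 0
      else if PySem.Str.isIn "blog" (PySem.Str.lower ref) then
        score + PySem.Dict.getD source_quality_scores "blog" 0
      else
        score + 1) acc
      = acc + (bibliography.map (fun r => tblScore SOURCE_TABLE (PySem.Str.lower r))).sum := by
  induction bibliography generalizing acc with
  | nil => simp
  | cons r rs ih =>
    rw [List.foldl_cons, step_eq, ih, List.map_cons, List.sum_cons]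
    ring

-- ===== VERDICT (by name: the statement is the Claim_ definition above) =====
theorem evaluate_bibliography_spec : Claim_equal_evaluate_bibliography := by
  intro bib _
  unfold Spec_evaluate_bibliography evaluate_bibliography evaluate_bibliography_alt
  rw [foldl_eq, go_eq, List.map_map]
  rfl
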